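-- pv_equiv track=rewrite | github.com/WilliamChalencon/SystemeProject | parcourir.py | trier_echantillon
-- ===== SOURCE A (Python) =====
-- def trier_echantillon(liste):
--     dico_echantillons={}
--     for path in liste :
--         echantillon=path.split("/")[-1]
--         if echantillon[:3] in dico_echantillons :
--             dico_echantillons[echantillon[:3]].append(path)
--         else:
--             dico_echantillons[echantillon[:3]]=[path]
--     return dico_echantillons
-- ===== SOURCE B (Python) =====
-- def trier_echantillon(liste):
--     key = lambda p: p.split("/")[-1][:3]
--     keys = list(dict.fromkeys(map(key, liste)))
--     return {k: [p for p in liste if key(p) == k] for k in keys}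
-- ===== Notes on version B (the rewrite author's own statement) =====
-- stated objective: alternative
-- what changed: Replaces the single-pass mutable-dict grouping (branch on key presence, append in place) by a declarative two-phase build: dedup the keys in first-occurrence order via dict.fromkeys, then construct each group with a filter comprehension over the input.
import Mathlib
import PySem

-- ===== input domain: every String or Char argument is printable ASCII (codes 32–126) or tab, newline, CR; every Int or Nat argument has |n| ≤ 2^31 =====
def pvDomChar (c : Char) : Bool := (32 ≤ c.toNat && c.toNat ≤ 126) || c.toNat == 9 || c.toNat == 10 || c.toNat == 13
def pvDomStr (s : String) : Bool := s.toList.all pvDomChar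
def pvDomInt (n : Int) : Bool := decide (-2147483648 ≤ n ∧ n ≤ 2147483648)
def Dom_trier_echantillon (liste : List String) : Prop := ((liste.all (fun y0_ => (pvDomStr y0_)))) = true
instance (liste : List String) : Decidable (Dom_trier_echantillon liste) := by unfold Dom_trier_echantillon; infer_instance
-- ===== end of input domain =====

-- B replaces A's single-pass mutable-dict grouping by deduping the keys (first-occurrence order) and building each group with a filter pass; alternative decomposition, not claimed faster.


-- ===== PORT A =====
-- shared key helper: path.split("/")[-1][:3]; split? is some (sep "/" ≠ ""), the result is never empty, so .getD/pyGetD are exact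
def pvKey (path : String) : String :=
  PySem.Str.slice (PySem.List.pyGetD ((PySem.Str.split? path "/").getD []) (-1) "") none (some 3)

def trier_echantillon (liste : List String) : List (String × List String) :=
  (liste.foldl (fun (dico : PySem.Dict String (List String)) path =>
      let ech := pvKey path
      match dico.get? ech with
      | some xs => dico.insert ech (xs ++ [path])
      | none => dico.insert ech [path]) PySem.Dict.empty).items

-- ===== PORT B =====
def trier_echantillon_alt (liste : List String) : List (String × List String) :=
  let keys := PySem.List.dedup (liste.map pvKey)
  keys.map (fun k => (k, liste.filter (fun p => pvKey p == k)))

-- ===== PRECONDITION & SPEC =====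
def Spec_trier_echantillon (liste : List String) (out : List (String × List String)) : Prop := out = trier_echantillon_alt liste
instance (liste : List String) (out : List (String × List String)) : Decidable (Spec_trier_echantillon liste out) := by unfold Spec_trier_echantillon; infer_instance

-- ===== CLAIM (what is proved, stated in full; the proofs are below) =====
def Claim_equal_trier_echantillon : Prop := ∀ (liste : List String), Dom_trier_echantillon liste → Spec_trier_echantillon liste (trier_echantillon liste)

-- ===== LEMMAS AND PROOFS =====

-- A's branch on key presence is exactly dict.modify with default []
theorem pvStep_eq (d : PySem.Dict String (List String)) (p : String) :
    (match d.get? (pvKey p) with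
     | some xs => d.insert (pvKey p) (xs ++ [p])
     | none => d.insert (pvKey p) [p])
    = d.modify (pvKey p) [] (fun v => v ++ [p]) := by
  cases h : d.get? (pvKey p) with
  | some xs =>
      simp [PySem.Dict.modify, PySem.Dict.getD_eq_get?_getD, h]
  | none =>
      simp [PySem.Dict.modify, PySem.Dict.getD_eq_get?_getD, h]

theorem pvFold_eq (liste : List String) :
    liste.foldl (fun (dico : PySem.Dict String (List String)) path =>
      let ech := pvKey path
      match dico.get? ech with
      | some xs => dico.insert ech (xs ++ [path])
      | none => dico.insert ech [path]) PySem.Dict.empty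
    = liste.foldl (fun d p => d.modify (pvKey p) [] (fun v => v ++ [p])) PySem.Dict.empty := by
  simp only [pvStep_eq]

theorem pvGetD_char (liste : List String) (c : String) :
    (liste.foldl (fun (d : PySem.Dict String (List String)) p =>
        d.modify (pvKey p) [] (fun v => v ++ [p])) PySem.Dict.empty).getD c []
    = liste.filter (fun p => pvKey p == c) := by
  have h := PySem.Dict.getD_foldl_modify_append
      (liste.map (fun p => (pvKey p, p))) (PySem.Dict.empty (κ := String) (ν := List String)) c
  rw [List.foldl_map] at h
  rw [List.filter_map] at h
  simpa [Function.comp_def] using h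

theorem pvKeys_char (liste : List String) :
    (liste.foldl (fun (d : PySem.Dict String (List String)) p =>
        d.modify (pvKey p) [] (fun v => v ++ [p])) PySem.Dict.empty).keys
    = PySem.Set.ofList (liste.map pvKey) := by
  have h := PySem.Dict.keys_foldl_modify_key liste pvKey ([] : List String)
      (fun _ p => (fun v => v ++ [p])) PySem.Dict.empty
  rw [h, PySem.Dict.keys_empty, PySem.Set.ofList_eq_foldl]
  rfl

-- ===== VERDICT (by name: the statement is the Claim_ definition above) =====
theorem trier_echantillon_spec : Claim_equal_trier_echantillon := by
  intro liste _
  unfold Spec_trier_echantillon trier_echantillon trier_echantillon_alt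
  rw [pvFold_eq]
  rw [PySem.Dict.items_eq_map_keys _
      (PySem.Dict.nodup_keys_foldl_modify_key liste pvKey [] (fun _ p => (fun v => v ++ [p]))
        PySem.Dict.empty (by simp [PySem.Dict.keys_empty])) ([] : List String)]
  rw [pvKeys_char, PySem.List.dedup_eq_ofList]
  apply List.map_congr_left
  intro k _
  rw [pvGetD_char]
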